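-- pv_equiv track=rewrite | github.com/skanndar/ml-training | scripts/export_dataset.py | is_permissive_license
-- ===== SOURCE A (Python) =====
-- PERMISSIVE_LICENSES = {
--     'CC0', 'CC-BY', 'CC-BY-SA',
--     'public domain', 'Public Domain',
--     'No known copyright', 'No copyright',
--     'Apache-2.0', 'MIT', 'BSD'
-- }
--
-- def is_permissive_license(license_str: str) -> bool:
--     """Check if a license is permissive (safe for commercial use)."""
--     if not license_str:
--         return False
--
--     license_lower = license_str.lower()
--
--     # Check for permissive licenses
--     for perm in PERMISSIVE_LICENSES:
--         if perm.lower() in license_lower: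
--             return True
--
--     # Explicitly reject non-commercial
--     if 'nc' in license_lower or 'non-commercial' in license_lower:
--         return False
--
--     # Explicitly reject no-derivatives
--     if 'nd' in license_lower or 'no-deriv' in license_lower:
--         return False
--
--     return False
-- ===== SOURCE B (Python) =====
-- # Position-major single scan: at each index test all (lowercased, deduplicated)
-- # permissive markers at once with tuple-startswith, instead of one substring
-- # search per candidate; 'cc-by-sa' is subsumed by 'cc-by' and the dead
-- # reject-branches of the original all returned False, so they are dropped.
-- PERMISSIVE_MARKERS = ('cc0', 'cc-by', 'public domain', 'no known copyright',
--                       'no copyright', 'apache-2.0', 'mit', 'bsd')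
--
--
-- def is_permissive_license(license_str: str) -> bool:
--     """Check if a license is permissive (safe for commercial use)."""
--     if not license_str:
--         return False
--     text = license_str.lower()
--     return any(text.startswith(PERMISSIVE_MARKERS, i) for i in range(len(text)))
-- ===== Notes on version B (the rewrite author's own statement) =====
-- stated objective: alternative
-- what changed: Replaces the per-candidate substring-search loop (plus dead reject branches) by a single position-major scan over the lowered string that tests a precomputed lowercased marker tuple with startswith at each index, dropping the redundant 'cc-by-sa' marker.
import Mathlib
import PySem

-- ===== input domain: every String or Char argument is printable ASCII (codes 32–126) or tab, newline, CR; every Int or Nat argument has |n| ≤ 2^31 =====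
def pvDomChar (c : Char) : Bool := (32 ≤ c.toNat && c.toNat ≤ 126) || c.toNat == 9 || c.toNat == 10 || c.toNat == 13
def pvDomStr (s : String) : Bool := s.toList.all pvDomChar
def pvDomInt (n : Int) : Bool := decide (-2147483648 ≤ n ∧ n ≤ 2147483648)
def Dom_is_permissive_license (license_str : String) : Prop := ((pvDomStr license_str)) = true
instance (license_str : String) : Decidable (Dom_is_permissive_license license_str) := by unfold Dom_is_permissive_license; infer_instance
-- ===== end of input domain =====

-- B replaces A's per-candidate substring loop (and its dead reject branches) by a single
-- position-major scan testing a precomputed lowercased marker list at each index (alternative, same cost).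


-- ===== PORT A =====
def pvPermissiveLicenses : List String :=
  ["CC0", "CC-BY", "CC-BY-SA", "public domain", "Public Domain",
   "No known copyright", "No copyright", "Apache-2.0", "MIT", "BSD"]

-- the for-loop with early 'return True' is the .any; the trailing reject branches all return False
def is_permissive_license (license_str : String) : Bool :=
  if license_str.toList = [] then false
  else
    let license_lower := PySem.Chars.lower license_str.toList
    if pvPermissiveLicenses.any (fun perm => PySem.Chars.isIn (PySem.Chars.lower perm.toList) license_lower) then true
    else if PySem.Chars.isIn "nc".toList license_lower || PySem.Chars.isIn "non-commercial".toList license_lower then false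
    else if PySem.Chars.isIn "nd".toList license_lower || PySem.Chars.isIn "no-deriv".toList license_lower then false
    else false

-- ===== PORT B =====
def pvMarkers : List (List Char) :=
  ["cc0".toList, "cc-by".toList, "public domain".toList, "no known copyright".toList,
   "no copyright".toList, "apache-2.0".toList, "mit".toList, "bsd".toList]

-- text.startswith(PERMISSIVE_MARKERS, i) is the inner .any of isPrefixOf on text.drop i (exact for 0 ≤ i ≤ len)
def is_permissive_license_alt (license_str : String) : Bool :=
  if license_str.toList = [] then false
  else
    let text := PySem.Chars.lower license_str.toList
    (List.range text.length).any (fun i => pvMarkers.any (fun p => p.isPrefixOf (text.drop i)))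

-- ===== PRECONDITION & SPEC =====
def Spec_is_permissive_license (license_str : String) (out : Bool) : Prop := out = is_permissive_license_alt license_str
instance (license_str : String) (out : Bool) : Decidable (Spec_is_permissive_license license_str out) := by unfold Spec_is_permissive_license; infer_instance

-- ===== CLAIM (what is proved, stated in full; the proofs are below) =====
def Claim_equal_is_permissive_license : Prop := ∀ (license_str : String), Dom_is_permissive_license license_str → Spec_is_permissive_license license_str (is_permissive_license license_str)

-- ===== LEMMAS AND PROOFS =====

-- a nonempty pattern occurs at some position < length iff it is a substring
lemma perPattern (p t : List Char) (hp : p ≠ []) :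
    ((List.range t.length).any fun i => p.isPrefixOf (t.drop i)) = PySem.Chars.isIn p t := by
  rcases h : PySem.Chars.isIn p t with _ | _
  · simp only [List.any_eq_false, List.mem_range]
    intro i _ hpre
    rw [PySem.Chars.isIn_eq_false_iff] at h
    exact h ((List.isPrefixOf_iff_prefix.mp hpre).isInfix.trans (List.drop_suffix i t).isInfix)
  · rw [← PySem.Chars.exists_prefix_drop_iff_isIn] at h
    obtain ⟨j, hj⟩ := h
    simp only [List.any_eq_true, List.mem_range]
    by_cases hlt : j < t.length
    · exact ⟨j, hlt, List.isPrefixOf_iff_prefix.mpr hj⟩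
    · exfalso
      rw [List.drop_eq_nil_of_le (le_of_not_gt hlt), List.prefix_nil] at hj
      exact hp hj

-- exchange the position-major and pattern-major iteration orders
lemma swapAny (t : List Char) (P : List (List Char)) :
    ((List.range t.length).any fun i => P.any (fun p => p.isPrefixOf (t.drop i)))
      = P.any (fun p => (List.range t.length).any fun i => p.isPrefixOf (t.drop i)) := by
  rw [Bool.eq_iff_iff]
  simp only [List.any_eq_true, List.mem_range]
  tauto

-- A's reject branches after a failed loop all yield False
lemma ifCollapse (c d e : Bool) :
    (if c then true else if d then false else if e then false else false) = c := by
  cases c <;> cases d <;> cases e <;> simp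

-- ===== VERDICT (by name: the statement is the Claim_ definition above) =====
set_option maxHeartbeats 1000000 in
theorem is_permissive_license_spec : Claim_equal_is_permissive_license := by
  intro s _
  unfold Spec_is_permissive_license is_permissive_license is_permissive_license_alt
  by_cases h : s.toList = []
  · simp [h]
  simp only [if_neg h]
  generalize PySem.Chars.lower s.toList = t
  rw [ifCollapse, swapAny]
  simp only [pvPermissiveLicenses, pvMarkers, List.any_cons, List.any_nil]
  rw [perPattern _ t (by decide), perPattern _ t (by decide), perPattern _ t (by decide),
      perPattern _ t (by decide), perPattern _ t (by decide), perPattern _ t (by decide),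
      perPattern _ t (by decide), perPattern _ t (by decide)]
  simp only [show PySem.Chars.lower "CC0".toList = "cc0".toList from by decide,
    show PySem.Chars.lower "CC-BY".toList = "cc-by".toList from by decide,
    show PySem.Chars.lower "CC-BY-SA".toList = "cc-by-sa".toList from by decide,
    show PySem.Chars.lower "public domain".toList = "public domain".toList from by decide,
    show PySem.Chars.lower "Public Domain".toList = "public domain".toList from by decide,
    show PySem.Chars.lower "No known copyright".toList = "no known copyright".toList from by decide,
    show PySem.Chars.lower "No copyright".toList = "no copyright".toList from by decide,
    show PySem.Chars.lower "Apache-2.0".toList = "apache-2.0".toList from by decide,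
    show PySem.Chars.lower "MIT".toList = "mit".toList from by decide,
    show PySem.Chars.lower "BSD".toList = "bsd".toList from by decide]
  have himp : PySem.Chars.isIn "cc-by-sa".toList t = true → PySem.Chars.isIn "cc-by".toList t = true := by
    rw [PySem.Chars.isIn_iff_infix, PySem.Chars.isIn_iff_infix]
    exact fun hx => (List.IsPrefix.isInfix (by decide : "cc-by".toList <+: "cc-by-sa".toList)).trans hx
  rw [Bool.eq_iff_iff]
  simp only [Bool.or_eq_true]
  constructor <;> intro hx <;> rcases hx with h1|h1|h1|h1|h1|h1|h1|h1|h1|h1 <;> tauto
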